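-- pv_equiv track=rewrite | github.com/qxl0/Leetcode-Python | MinimumUniqueWordAbbreviation.py | abbr
-- ===== SOURCE A (Python) =====
-- def abbr(target, num):
--     word, count = "", 0
--     for w in target:
--         if num & 1 == 1:
--             if count:
--                 word += str(count)
--                 count = 0
--             word += w
--         else:
--             count += 1
--
--         num >>= 1
--     if count:
--         word += str(count)
--     return word
-- ===== SOURCE B (Python) =====
-- def abbr(target, num):
--     n = len(target)
--     parts = []
--     i = 0
--     while i < n:
--         bit = (num >> i) & 1
--         j = i + 1
--         while j < n and ((num >> j) & 1) == bit:
--             j += 1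
--         parts.append(target[i:j] if bit else str(j - i))
--         i = j
--     return ''.join(parts)
-- ===== Notes on version B (the rewrite author's own statement) =====
-- stated objective: alternative
-- what changed: B finds maximal runs of equal mask bits with an index scan and emits a slice or a run-length per run, instead of A's per-character fold with a running skip counter and flush branches.
import Mathlib
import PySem

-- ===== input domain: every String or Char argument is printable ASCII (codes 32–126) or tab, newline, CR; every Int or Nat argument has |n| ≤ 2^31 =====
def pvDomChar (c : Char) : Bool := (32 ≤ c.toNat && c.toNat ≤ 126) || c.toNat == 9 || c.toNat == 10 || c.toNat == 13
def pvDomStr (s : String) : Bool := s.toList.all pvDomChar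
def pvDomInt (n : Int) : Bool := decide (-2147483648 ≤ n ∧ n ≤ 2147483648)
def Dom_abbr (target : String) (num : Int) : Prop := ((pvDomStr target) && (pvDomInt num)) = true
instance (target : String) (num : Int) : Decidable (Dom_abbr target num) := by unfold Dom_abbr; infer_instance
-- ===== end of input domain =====

-- B replaces A's per-character counter-and-flush fold by a scan over maximal runs of equal mask bits (slice for kept runs, run length for skipped runs); return values are proved equal.

-- ===== PORT A =====
-- state: (word as list of chars, count, num)
def abbrStep (s : List Char × Int × Int) (w : Char) : List Char × Int × Int :=
  if PySem.Int.mod s.2.2 2 = 1 then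
    ((if s.2.1 ≠ 0 then s.1 ++ PySem.Int.toChars s.2.1 else s.1) ++ [w], 0, PySem.Int.floordiv s.2.2 2)
  else (s.1, s.2.1 + 1, PySem.Int.floordiv s.2.2 2)

-- the final 'if count: word += str(count)' and return
def abbrFinish (s : List Char × Int × Int) : String :=
  String.ofList (if s.2.1 ≠ 0 then s.1 ++ PySem.Int.toChars s.2.1 else s.1)

def abbr (target : String) (num : Int) : String :=
  abbrFinish (target.toList.foldl abbrStep ([], 0, num))

-- ===== PORT B =====
-- (num >> i) & 1
def pyBit (num : Int) (i : Nat) : Int :=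
  PySem.Int.mod (PySem.Int.floordiv num ((2:Int) ^ i)) 2

-- inner while: advance j while j < n and (num >> j) & 1 == bit
def runEnd (num bit : Int) (n j : Nat) : Nat :=
  if h : j < n ∧ pyBit num j = bit then runEnd num bit n (j + 1) else j
termination_by n - j
decreasing_by omega

-- needed by buildParts for termination
theorem le_runEnd (num bit : Int) (n j : Nat) : j ≤ runEnd num bit n j := by
  rw [runEnd]
  split_ifs with h
  · exact Nat.le_of_succ_le (le_runEnd num bit n (j + 1))
  · exact Nat.le_refl j
termination_by n - j
decreasing_by omega

-- outer while: one maximal run per iteration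
def buildParts (target : List Char) (num : Int) (n i : Nat) : List String :=
  if _h : i < n then
    let bit := pyBit num i
    let j := runEnd num bit n (i + 1)
    (if bit = 1 then String.ofList ((target.drop i).take (j - i))
     else PySem.Int.toStr ((j : Int) - (i : Int))) :: buildParts target num n j
  else []
termination_by n - i
decreasing_by have := le_runEnd num (pyBit num i) n (i + 1); omega

def abbr_alt (target : String) (num : Int) : String :=
  PySem.Str.join "" (buildParts target.toList num target.toList.length 0)

-- ===== PRECONDITION & SPEC =====
def Spec_abbr (target : String) (num : Int) (out : String) : Prop := out = abbr_alt target num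
instance (target : String) (num : Int) (out : String) : Decidable (Spec_abbr target num out) := by unfold Spec_abbr; infer_instance

-- ===== CLAIM (what is proved, stated in full; the proofs are below) =====
def Claim_equal_abbr : Prop := ∀ (target : String) (num : Int), Dom_abbr target num → Spec_abbr target num (abbr target num)

-- ===== LEMMAS AND PROOFS =====

-- A's loop, characterised as a recursive function over the remaining characters
def fA (cs : List Char) (c m : Int) : List Char :=
  match cs with
  | [] => if c ≠ 0 then PySem.Int.toChars c else []
  | ch :: cs' =>
    if PySem.Int.mod m 2 = 1 then
      (if c ≠ 0 then PySem.Int.toChars c else []) ++ ch :: fA cs' 0 (PySem.Int.floordiv m 2)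
    else fA cs' (c + 1) (PySem.Int.floordiv m 2)

theorem foldA_eq (cs : List Char) : ∀ (w : List Char) (c m : Int),
    (fun s : List Char × Int × Int => if s.2.1 ≠ 0 then s.1 ++ PySem.Int.toChars s.2.1 else s.1)
      (cs.foldl abbrStep (w, c, m)) = w ++ fA cs c m := by
  induction cs with
  | nil =>
    intro w c m
    by_cases hc : c = 0 <;> simp [fA, hc]
  | cons ch cs ih =>
    intro w c m
    have hm2 : PySem.Int.mod m 2 = m % 2 := PySem.Int.mod_eq_emod_of_pos (by norm_num)
    by_cases hm : m % 2 = 1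
    · by_cases hc : c = 0 <;>
        simp [fA, abbrStep, hm2, hm, hc, List.foldl_cons, ih]
    · simp [fA, abbrStep, hm2, hm, List.foldl_cons, ih]

theorem bit01 (num : Int) (i : Nat) : pyBit num i = 0 ∨ pyBit num i = 1 := by
  unfold pyBit
  rw [PySem.Int.mod_eq_emod_of_pos (by norm_num)]
  have h1 := Int.emod_nonneg (PySem.Int.floordiv num ((2:Int) ^ i)) (by norm_num : (2:Int) ≠ 0)
  have h2 := Int.emod_lt_of_pos (PySem.Int.floordiv num ((2:Int) ^ i)) (by norm_num : (0:Int) < 2)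
  omega

theorem shift_succ (num : Int) (i : Nat) :
    PySem.Int.floordiv (PySem.Int.floordiv num ((2:Int) ^ i)) 2
      = PySem.Int.floordiv num ((2:Int) ^ (i + 1)) := by
  rw [PySem.Int.floordiv_eq_ediv_of_pos (by positivity),
      PySem.Int.floordiv_eq_ediv_of_pos (by norm_num),
      PySem.Int.floordiv_eq_ediv_of_pos (by positivity),
      Int.ediv_ediv_of_nonneg (by positivity), pow_succ]

theorem runEnd_props (num bit : Int) (n j : Nat) (hj : j ≤ n) :
    runEnd num bit n j ≤ n ∧
    (∀ k, j ≤ k → k < runEnd num bit n j → pyBit num k = bit) ∧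
    (runEnd num bit n j = n ∨ pyBit num (runEnd num bit n j) ≠ bit) := by
  rw [runEnd]
  split_ifs with h
  · have ih := runEnd_props num bit n (j + 1) h.1
    refine ⟨ih.1, ?_, ih.2.2⟩
    intro k hk1 hk2
    rcases Nat.eq_or_lt_of_le hk1 with rfl | hlt
    · exact h.2
    · exact ih.2.1 k hlt hk2
  · refine ⟨hj, fun k hk1 hk2 => absurd hk1 (by omega), ?_⟩
    rcases Nat.lt_or_ge j n with hn | hn
    · exact Or.inr (fun hb => h ⟨hn, hb⟩)
    · exact Or.inl (by omega)
termination_by n - j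
decreasing_by omega

theorem flush_fA (cs : List Char) (c m : Int) (hc : c ≠ 0)
    (h : cs = [] ∨ PySem.Int.mod m 2 = 1) :
    fA cs c m = PySem.Int.toChars c ++ fA cs 0 m := by
  cases cs with
  | nil => simp [fA, hc]
  | cons ch cs' =>
    rcases h with h | h
    · cases h
    · have hm2 : PySem.Int.mod m 2 = m % 2 := PySem.Int.mod_eq_emod_of_pos (by norm_num)
      rw [hm2] at h
      simp [fA, h, hc]

theorem zeros_run (chars : List Char) (num : Int) : ∀ (d i : Nat) (c : Int),
    i + d ≤ chars.length → (∀ k, i ≤ k → k < i + d → pyBit num k = 0) →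
    fA (chars.drop i) c (PySem.Int.floordiv num ((2:Int) ^ i))
      = fA (chars.drop (i + d)) (c + (d : Int)) (PySem.Int.floordiv num ((2:Int) ^ (i + d))) := by
  intro d
  induction d with
  | zero => intro i c _ _; simp
  | succ d ih =>
    intro i c hlen hbits
    have hi : i < chars.length := by omega
    rw [List.drop_eq_getElem_cons hi]
    have hb : pyBit num i = 0 := hbits i le_rfl (by omega)
    have hm : PySem.Int.mod (PySem.Int.floordiv num ((2:Int) ^ i)) 2 ≠ 1 := by
      unfold pyBit at hb; rw [hb]; norm_num
    rw [fA, if_neg hm, shift_succ]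
    have e1 : i + 1 + d = i + (d + 1) := by omega
    have e2 : c + 1 + (d : Int) = c + ((d : Nat) + 1 : Nat) := by push_cast; ring
    rw [ih (i + 1) (c + 1) (by omega) (fun k h1 h2 => hbits k (by omega) (by omega)), e1, e2]

theorem ones_run (chars : List Char) (num : Int) : ∀ (d i : Nat),
    i + d ≤ chars.length → (∀ k, i ≤ k → k < i + d → pyBit num k = 1) →
    fA (chars.drop i) 0 (PySem.Int.floordiv num ((2:Int) ^ i))
      = (chars.drop i).take d ++ fA (chars.drop (i + d)) 0 (PySem.Int.floordiv num ((2:Int) ^ (i + d))) := by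
  intro d
  induction d with
  | zero => intro i _ _; simp
  | succ d ih =>
    intro i hlen hbits
    have hi : i < chars.length := by omega
    rw [List.drop_eq_getElem_cons hi]
    have hb : pyBit num i = 1 := hbits i le_rfl (by omega)
    have hm : PySem.Int.mod (PySem.Int.floordiv num ((2:Int) ^ i)) 2 = 1 := hb
    rw [fA, if_pos hm, shift_succ]
    have e1 : i + 1 + d = i + (d + 1) := by omega
    rw [ih (i + 1) (by omega) (fun k h1 h2 => hbits k (by omega) (by omega)), e1,
        List.take_succ_cons, List.cons_append]
    simp

theorem join_empty_toList (l : List String) :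
    (PySem.Str.join "" l).toList = (l.map String.toList).flatten := by
  induction l with
  | nil => simp [PySem.Str.toList_join, PySem.Chars.join_nil]
  | cons s l ih =>
    cases l with
    | nil => simp [PySem.Str.toList_join, PySem.Chars.join_singleton]
    | cons t r =>
      rw [PySem.Str.toList_join] at ih ⊢
      simp only [List.map_cons] at ih ⊢
      rw [PySem.Chars.join_cons_cons, ih]
      simp

theorem joinParts (chars : List Char) (num : Int) (i : Nat) :
    (PySem.Str.join "" (buildParts chars num chars.length i)).toList
      = fA (chars.drop i) 0 (PySem.Int.floordiv num ((2:Int) ^ i)) := by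
  rw [join_empty_toList, buildParts]
  by_cases h : i < chars.length
  · rw [dif_pos h]
    have hj1 : i + 1 ≤ runEnd num (pyBit num i) chars.length (i + 1) :=
      le_runEnd num (pyBit num i) chars.length (i + 1)
    obtain ⟨hjn, hrun, hend⟩ := runEnd_props num (pyBit num i) chars.length (i + 1) (by omega)
    have hrunA : ∀ k, i ≤ k → k < runEnd num (pyBit num i) chars.length (i + 1) → pyBit num k = pyBit num i := by
      intro k h1 h2
      rcases Nat.eq_or_lt_of_le h1 with rfl | h1
      · rfl
      · exact hrun k h1 h2
    have hrec := joinParts chars num (runEnd num (pyBit num i) chars.length (i + 1))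
    rw [join_empty_toList] at hrec
    set j := runEnd num (pyBit num i) chars.length (i + 1) with hjdef
    have hd : i + (j - i) = j := by omega
    have hside : chars.drop j = [] ∨ PySem.Int.mod (PySem.Int.floordiv num ((2:Int) ^ j)) 2 = 1 ∨ pyBit num i = 1 := by
      rcases hend with he | he
      · exact Or.inl (List.drop_eq_nil_of_le (by omega))
      · rcases bit01 num j with hb | hb
        · rcases bit01 num i with hbi | hbi
          · exact absurd (hb.trans hbi.symm) he
          · exact Or.inr (Or.inr hbi)
        · exact Or.inr (Or.inl hb)
    rw [List.map_cons, List.flatten_cons]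
    rcases bit01 num i with hb | hb
    · -- skipped run: emit the run length
      have hz := zeros_run chars num (j - i) i 0 (by omega)
        (fun k h1 h2 => (hrunA k h1 (by omega)).trans hb)
      rw [hd] at hz
      have hdz : ((j - i : Nat) : Int) ≠ 0 := by
        have : 1 ≤ j - i := by omega
        omega
      have hflush := flush_fA (chars.drop j) ((0:Int) + ((j - i : Nat) : Int))
        (PySem.Int.floordiv num ((2:Int) ^ j)) (by simpa using hdz) ?_
      · rw [hz, hflush, hrec, if_neg (by rw [hb]; norm_num)]
        have hcast : (j : Int) - (i : Int) = (0:Int) + ((j - i : Nat) : Int) := by omega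
        rw [PySem.Int.toList_toStr, hcast]
      · rcases hside with hs | hs | hs
        · exact Or.inl hs
        · exact Or.inr hs
        · exact absurd (hb.symm.trans hs) (by norm_num)
    · -- kept run: emit the characters
      have ho := ones_run chars num (j - i) i (by omega)
        (fun k h1 h2 => (hrunA k h1 (by omega)).trans hb)
      rw [hd] at ho
      rw [ho, hrec, if_pos hb]
      simp
      rfl
  · rw [dif_neg h]
    rw [List.drop_eq_nil_of_le (by omega)]
    simp [fA]
termination_by chars.length - i
decreasing_by omega

-- ===== VERDICT (by name: the statement is the Claim_ definition above) =====
theorem abbr_spec : Claim_equal_abbr := by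
  intro target num _
  unfold Spec_abbr
  have hA := foldA_eq target.toList [] 0 num
  simp only [List.nil_append] at hA
  have hB := joinParts target.toList num 0
  have h1 : PySem.Int.floordiv num ((2:Int) ^ 0) = num := by
    rw [pow_zero, PySem.Int.floordiv_eq_ediv_of_pos (by norm_num), Int.ediv_one]
  rw [h1, List.drop_zero] at hB
  have hAeq : abbr target num = String.ofList (fA target.toList 0 num) := by
    unfold abbr abbrFinish
    rw [hA]
  rw [hAeq, ← hB]
  unfold abbr_alt
  exact String.ofList_toList
    (s := PySem.Str.join "" (buildParts target.toList num target.toList.length 0))
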